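-- pv_equiv track=rewrite | github.com/jhsilvaz13/AgenteTetris | src/AIBot/prueba.py | get_possible_board_states
-- ===== SOURCE A (Python) =====
-- def can_place_piece(board, piece, row, col):
--     for i in range(len(piece)):
--         for j in range(len(piece[0])):
--             if piece[i][j] == 1:
--                 actual_row = row + i
--                 if actual_row >= len(board) or col + j < 0 or col + j >= len(board[0]) or board[actual_row][col + j] == 1:
--                     return False
--     return True
--
-- def place_piece(board, piece, row, col):
--     new_board = [row[:] for row in board]
--     for i in range(len(piece)):
--         for j in range(len(piece[0])):
--             if piece[i][j] == 1:
--                 new_board[row + i][col + j] = 1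
--     return new_board
--
-- def get_possible_board_states(board, piece):
--     possible_board_states = []
--     for col in range(len(board[0]) - len(piece[0]) + 1):
--         min_lowest_row = float('inf')
--         for j in range(len(piece[0])):
--             for i in range(len(piece)):
--                 if piece[i][j] == 1:
--                     actual_row = 0
--                     while actual_row + 1 < len(board) and board[actual_row + 1][col + j] == 0:
--                         actual_row += 1
--                     min_lowest_row = min(min_lowest_row, actual_row)
--         for row in range(len(board) - len(piece) + 1):
--             if row > min_lowest_row:
--                 break
--             if can_place_piece(board, piece, row, col):
--                 new_board = place_piece(board, piece, row, col)
--                 possible_board_states.append(new_board)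
--     return possible_board_states
-- ===== SOURCE B (Python) =====
-- def can_place_piece(board, piece, row, col):
--     for i in range(len(piece)):
--         for j in range(len(piece[0])):
--             if piece[i][j] == 1:
--                 actual_row = row + i
--                 if actual_row >= len(board) or col + j < 0 or col + j >= len(board[0]) or board[actual_row][col + j] == 1:
--                     return False
--     return True
--
-- def place_piece(board, piece, row, col):
--     new_board = [r[:] for r in board]
--     for i in range(len(piece)):
--         for j in range(len(piece[0])):
--             if piece[i][j] == 1:
--                 new_board[row + i][col + j] = 1
--     return new_board
--
-- def _rest(board, c):
--     r = 0
--     while r + 1 < len(board) and board[r + 1][c] == 0: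
--         r += 1
--     return r
--
-- def get_possible_board_states(board, piece):
--     H, W = len(board), len(board[0])
--     ph, pw = len(piece), len(piece[0])
--     if pw > W:
--         return []  # piece wider than the board: no placement columns
--     rest = [_rest(board, c) for c in range(W)]
--     has_one = [any(r[j] == 1 for r in piece) for j in range(pw)]
--     out = []
--     for col in range((W + 1) - pw):
--         mins = [rest[col + j] for j in range(pw) if has_one[j]]
--         bound = (H + 1) - ph if not mins else min((H + 1) - ph, min(mins) + 1)
--         out.extend(place_piece(board, piece, row, col)
--                    for row in range(bound)
--                    if can_place_piece(board, piece, row, col))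
--     return out
-- ===== Notes on version B (the rewrite author's own statement) =====
-- stated objective: alternative
-- what changed: B precomputes the resting-row scan once per board column and a has-a-1 flag once per piece column, then derives each placement column's row bound in closed form (min over the table) and emits the placements with a flat comprehension, instead of A's re-running the while-scan for every (col, piece-cell) hit and breaking out of the row loop.
-- outside the precondition, e.g. on get_possible_board_states([[1, 2], [3]], [[0], [0]]): A returns [[[1, 2], [3]], [[1, 2], [3]]], B raises IndexError
import Mathlib
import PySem

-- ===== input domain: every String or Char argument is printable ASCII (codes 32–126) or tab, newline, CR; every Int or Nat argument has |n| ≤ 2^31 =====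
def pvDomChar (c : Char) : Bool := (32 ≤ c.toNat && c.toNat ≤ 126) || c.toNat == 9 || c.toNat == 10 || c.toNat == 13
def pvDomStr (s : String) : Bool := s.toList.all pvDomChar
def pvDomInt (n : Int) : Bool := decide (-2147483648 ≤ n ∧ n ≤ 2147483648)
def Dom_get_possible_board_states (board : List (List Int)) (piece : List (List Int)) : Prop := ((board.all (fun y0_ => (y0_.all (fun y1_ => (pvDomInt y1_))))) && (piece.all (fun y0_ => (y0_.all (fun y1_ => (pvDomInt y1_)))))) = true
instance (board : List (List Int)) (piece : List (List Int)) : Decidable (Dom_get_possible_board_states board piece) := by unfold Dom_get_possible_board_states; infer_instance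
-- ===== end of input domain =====

-- B replaces A's per-hit resting-row rescans and break-terminated row loop by per-column
-- precomputed tables and a closed-form row bound (objective: alternative decomposition).

-- ===== PORT A =====
-- board[r][c] (in-range on Pre_; Python raises out of range, excluded by Pre_)
def pvCell (board : List (List Int)) (r c : Nat) : Int := (board.getD r []).getD c 0

-- helper can_place_piece, shared verbatim by Source A and Source B
def can_place_piece (board piece : List (List Int)) (row col : Nat) : Bool :=
  (List.range piece.length).all fun i =>
    (List.range (piece.headD []).length).all fun j =>
      if (piece.getD i []).getD j 0 == 1 then
        !(decide (board.length ≤ row + i) || decide ((board.headD []).length ≤ col + j) ||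
          (pvCell board (row + i) (col + j) == 1))
      else true

-- helper place_piece, shared verbatim by Source A and Source B
def place_piece (board piece : List (List Int)) (row col : Nat) : List (List Int) :=
  (List.range piece.length).foldl (fun b i =>
    (List.range (piece.headD []).length).foldl (fun b j =>
      if (piece.getD i []).getD j 0 == 1 then b.modify (row + i) (fun rw => rw.set (col + j) 1) else b) b)
    board

-- the while-scan 'actual_row += 1 while board[actual_row+1][c] == 0' (fuel = board height)
def pvRestAux (board : List (List Int)) (c : Nat) : Nat → Nat → Nat
  | r, 0 => r
  | r, fuel + 1 =>
      if r + 1 < board.length && (pvCell board (r + 1) c == 0) then pvRestAux board c (r + 1) fuel else r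

def pvRest (board : List (List Int)) (c : Nat) : Nat := pvRestAux board c 0 board.length

-- min with float('inf') as none
def pvMinO (m : Option Nat) (v : Nat) : Option Nat :=
  some (match m with | none => v | some x => min x v)

-- 'row > min_lowest_row' with inf as none
def pvGtO (r : Nat) (m : Option Nat) : Bool :=
  match m with | none => false | some x => decide (x < r)

-- the row loop with its break, recursion on the remaining row count
def pvRowsA (board piece : List (List Int)) (col : Nat) (mlr : Option Nat) : Nat → Nat → List (List (List Int))
  | _, 0 => []
  | row, k + 1 =>
      if pvGtO row mlr then []
      else (if can_place_piece board piece row col then [place_piece board piece row col] else []) ++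
           pvRowsA board piece col mlr (row + 1) k

def get_possible_board_states (board : List (List Int)) (piece : List (List Int)) : List (List (List Int)) :=
  let W := (board.headD []).length
  let pw := (piece.headD []).length
  (List.range ((W + 1) - pw)).foldl (fun acc col =>
    let mlr := (List.range pw).foldl (fun m j =>
      (List.range piece.length).foldl (fun m i =>
        if (piece.getD i []).getD j 0 == 1 then pvMinO m (pvRest board (col + j)) else m) m) none
    acc ++ pvRowsA board piece col mlr 0 ((board.length + 1) - piece.length)) []

-- ===== PORT B =====
def get_possible_board_states_alt (board : List (List Int)) (piece : List (List Int)) : List (List (List Int)) :=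
  let H := board.length
  let W := (board.headD []).length
  let ph := piece.length
  let pw := (piece.headD []).length
  if W < pw then [] else
  let rest := (List.range W).map (pvRest board)
  let hasOne := (List.range pw).map (fun j => piece.any (fun r => r.getD j 0 == 1))
  (List.range ((W + 1) - pw)).flatMap (fun col =>
    let mins := ((List.range pw).filter (fun j => hasOne.getD j false)).map (fun j => rest.getD (col + j) 0)
    let bound := match mins.min? with
      | none => (H + 1) - ph
      | some m => min ((H + 1) - ph) (m + 1)
    (List.range bound).filterMap (fun row =>
      if can_place_piece board piece row col then some (place_piece board piece row col) else none))

-- ===== PRECONDITION & SPEC =====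
-- Pre_ excludes the inputs where the Python raises IndexError: empty board/piece
-- (len(board[0])/len(piece[0])) and — unless the piece is wider than board row 0, where A
-- returns [] untouched — ragged inputs whose rows are shorter than row 0.  On a few such
-- ragged inputs A happens to return (when the piece has no 1s its column scans never run),
-- but B's eager per-column scan raises there; see the cite.
def Pre_get_possible_board_states (board : List (List Int)) (piece : List (List Int)) : Prop :=
  board ≠ [] ∧ piece ≠ [] ∧
  ((piece.headD []).length ≤ (board.headD []).length →
    (∀ r ∈ board, (board.headD []).length ≤ r.length) ∧
    (∀ r ∈ piece, (piece.headD []).length ≤ r.length))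
instance (board : List (List Int)) (piece : List (List Int)) : Decidable (Pre_get_possible_board_states board piece) := by unfold Pre_get_possible_board_states; infer_instance

def pvWitness_get_possible_board_states : List (List Int) × List (List Int) :=
  ([[0, 0], [0, 0]], [[1]])

def Spec_get_possible_board_states (board : List (List Int)) (piece : List (List Int)) (out : List (List (List Int))) : Prop := out = get_possible_board_states_alt board piece
instance (board : List (List Int)) (piece : List (List Int)) (out : List (List (List Int))) : Decidable (Spec_get_possible_board_states board piece out) := by unfold Spec_get_possible_board_states; infer_instance

-- ===== CLAIM (what is proved, stated in full; the proofs are below) =====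
def Claim_equal_get_possible_board_states : Prop := ∀ (board : List (List Int)) (piece : List (List Int)), Dom_get_possible_board_states board piece → Pre_get_possible_board_states board piece → Spec_get_possible_board_states board piece (get_possible_board_states board piece)

-- ===== LEMMAS AND PROOFS =====

theorem pvMinO_absorb (m : Option Nat) (v : Nat) : pvMinO (pvMinO m v) v = pvMinO m v := by
  cases m <;> simp [pvMinO]

-- the inner i-fold of A collapses to one min update when the piece column has a 1
theorem foldl_if_min (q : Nat → Bool) (v0 : Nat) :
    ∀ (l : List Nat) (m : Option Nat),
      l.foldl (fun m i => if q i then pvMinO m v0 else m) m = if l.any q then pvMinO m v0 else m := by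
  intro l
  induction l with
  | nil => intro m; simp
  | cons a t ih =>
    intro m
    cases hqa : q a <;> simp [List.foldl_cons, List.any_cons, hqa, ih, pvMinO_absorb]

-- range-indexed any equals any over the rows
theorem any_range_getD (piece : List (List Int)) (j : Nat) :
    (List.range piece.length).any (fun i => (piece.getD i []).getD j 0 == 1)
      = piece.any (fun r => r.getD j 0 == 1) := by
  rw [Bool.eq_iff_iff]
  simp only [List.any_eq_true, List.mem_range]
  constructor
  · rintro ⟨i, hi, h⟩
    exact ⟨piece[i], List.getElem_mem hi, by rwa [List.getD_eq_getElem _ _ hi] at h⟩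
  · rintro ⟨r, hr, h⟩
    obtain ⟨i, hi, rfl⟩ := List.mem_iff_getElem.1 hr
    exact ⟨i, hi, by rwa [List.getD_eq_getElem _ _ hi]⟩

-- the guarded j-fold is the fold over the filtered, mapped column list
theorem foldl_if_filter_min (p : Nat → Bool) (v : Nat → Nat) :
    ∀ (l : List Nat) (m : Option Nat),
      l.foldl (fun m j => if p j then pvMinO m (v j) else m) m = ((l.filter p).map v).foldl pvMinO m := by
  intro l
  induction l with
  | nil => intro m; simp
  | cons a t ih =>
    intro m
    cases hpa : p a <;> simp [List.foldl_cons, hpa, ih]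

theorem foldl_min_comm : ∀ (t : List Nat) (x a : Nat), min x (t.foldl min a) = t.foldl min (min x a) := by
  intro t
  induction t with
  | nil => intro x a; rfl
  | cons b t ih => intro x a; simp only [List.foldl_cons]; rw [ih, Nat.min_assoc]

theorem min?_eq_foldl : ∀ (l : List Nat) (x : Nat), (x :: l).min? = some (l.foldl min x) := by
  intro l
  induction l with
  | nil => intro x; simp [List.min?_cons]
  | cons a t ih =>
    intro x
    rw [List.min?_cons, ih a]
    simp only [Option.elim_some, List.foldl_cons]
    rw [foldl_min_comm]

theorem foldl_pvMinO_some : ∀ (l : List Nat) (x : Nat), l.foldl pvMinO (some x) = some (l.foldl min x) := by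
  intro l
  induction l with
  | nil => intro x; rfl
  | cons a t ih => intro x; simpa [List.foldl_cons, pvMinO] using ih (min x a)

theorem foldl_pvMinO_none (l : List Nat) : l.foldl pvMinO none = l.min? := by
  cases l with
  | nil => rfl
  | cons a t =>
    show List.foldl pvMinO (pvMinO none a) t = _
    have : pvMinO none a = some a := rfl
    rw [this, foldl_pvMinO_some, min?_eq_foldl]

theorem getD_map_range {α : Type} (n : Nat) (f : Nat → α) (d : α) (j : Nat) (h : j < n) :
    ((List.range n).map f).getD j d = f j := by
  rw [List.getD_eq_getElem _ _ (by simpa using h)]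
  simp

theorem flatMap_congr_mem {α β : Type} {l : List α} {f g : α → List β}
    (h : ∀ x ∈ l, f x = g x) : l.flatMap f = l.flatMap g := by
  induction l with
  | nil => rfl
  | cons a t ih =>
    simp only [List.flatMap_cons]
    rw [h a (List.mem_cons_self), ih (fun x hx => h x (List.mem_cons_of_mem _ hx))]

-- the break-terminated row loop with no bound (min_lowest_row = inf)
theorem rowsA_none (board piece : List (List Int)) (col : Nat) :
    ∀ (k row : Nat),
      pvRowsA board piece col none row k
        = (List.range' row k).filterMap
            (fun r => if can_place_piece board piece r col then some (place_piece board piece r col) else none) := by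
  intro k
  induction k with
  | zero => intro row; rfl
  | succ k ih =>
    intro row
    rw [List.range'_succ]
    cases hcan : can_place_piece board piece row col <;>
      simp [pvRowsA, pvGtO, hcan, ih (row + 1)]

-- the break-terminated row loop with bound m iterates exactly rows row..min
theorem rowsA_some (board piece : List (List Int)) (col : Nat) (m : Nat) :
    ∀ (k row : Nat),
      pvRowsA board piece col (some m) row k
        = (List.range' row (min k (m + 1 - row))).filterMap
            (fun r => if can_place_piece board piece r col then some (place_piece board piece r col) else none) := by
  intro k
  induction k with
  | zero => intro row; simp [pvRowsA]
  | succ k ih =>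
    intro row
    by_cases hrow : m < row
    · have h0 : min (k + 1) (m + 1 - row) = 0 := by omega
      rw [h0]
      simp [pvRowsA, pvGtO, hrow]
    · have h1 : min (k + 1) (m + 1 - row) = (min k (m + 1 - (row + 1))) + 1 := by omega
      rw [h1, List.range'_succ]
      cases hcan : can_place_piece board piece row col <;>
        simp [pvRowsA, pvGtO, hrow, hcan, ih (row + 1)]

theorem main_eq (board piece : List (List Int)) :
    get_possible_board_states board piece = get_possible_board_states_alt board piece := by
  by_cases hW : (board.headD []).length < (piece.headD []).length
  · have h0 : ((board.headD []).length + 1) - (piece.headD []).length = 0 := by omega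
    simp only [get_possible_board_states, get_possible_board_states_alt, if_pos hW, h0,
      List.range_zero, List.foldl_nil]
  simp only [get_possible_board_states, get_possible_board_states_alt, if_neg hW]
  rw [PySem.List.foldl_append_eq_flatMap, List.nil_append]
  apply flatMap_congr_mem
  intro col hcol
  rw [List.mem_range] at hcol
  simp only [foldl_if_min, any_range_getD, foldl_if_filter_min, foldl_pvMinO_none]
  have hmins :
      ((List.range (piece.headD []).length).filter
          (fun j => ((List.range (piece.headD []).length).map (fun j => piece.any (fun r => r.getD j 0 == 1))).getD j false)).map
        (fun j => ((List.range (board.headD []).length).map (pvRest board)).getD (col + j) 0)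
      = ((List.range (piece.headD []).length).filter (fun j => piece.any (fun r => r.getD j 0 == 1))).map
          (fun j => pvRest board (col + j)) := by
    rw [List.filter_congr (fun j hj => getD_map_range _ _ _ _ (List.mem_range.1 hj))]
    apply List.map_congr_left
    intro j hj
    have hj' : j < (piece.headD []).length := List.mem_range.1 (List.mem_filter.1 hj).1
    exact getD_map_range _ _ _ _ (by omega)
  rw [hmins]
  cases hm : (((List.range (piece.headD []).length).filter (fun j => piece.any (fun r => r.getD j 0 == 1))).map
      (fun j => pvRest board (col + j))).min? with
  | none =>
    rw [rowsA_none, List.range_eq_range']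
  | some m =>
    rw [rowsA_some, List.range_eq_range']
    simp

-- ===== VERDICT (by name: the statement is the Claim_ definition above) =====
theorem get_possible_board_states_spec : Claim_equal_get_possible_board_states := by
  intro board piece _ _
  exact main_eq board piece
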